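-- pv_equiv track=rewrite | github.com/Ulix-hub/tevalovalo_flask_backend | test_tickets.py | validate_ticket
-- ===== SOURCE A (Python) =====
-- def validate_ticket(ticket):
--     all_cols = set()
--     total_numbers = 0
--     for row in ticket:
--         count = sum(1 for n in row if n is not None)
--         if count != 5:
--             return False, "Row does not have exactly 5 numbers"
--         total_numbers += count
--         for i, val in enumerate(row):
--             if val is not None:
--                 all_cols.add(i)
--     if total_numbers != 15:
--         return False, "Ticket does not have 15 numbers"
--     if len(all_cols) != 9:
--         return False, "Ticket does not use all 9 columns"
--     return True, "Valid"
-- ===== SOURCE B (Python) =====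
-- def validate_ticket(ticket):
--     rows = list(ticket)
--     for row in rows:
--         if len(row) - row.count(None) != 5:
--             return False, "Row does not have exactly 5 numbers"
--     # every row has exactly 5 numbers, so 15 numbers total <=> exactly 3 rows
--     if len(rows) != 3:
--         return False, "Ticket does not have 15 numbers"
--     width = 0
--     for row in rows:
--         width = max(width, len(row))
--     used = 0
--     for i in range(width):
--         if any(len(r) > i and r[i] is not None for r in rows):
--             used += 1
--     if used != 9:
--         return False, "Ticket does not use all 9 columns"
--     return True, "Valid"
-- ===== Notes on version B (the rewrite author's own statement) =====
-- stated objective: alternative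
-- what changed: B drops A's running total and column set entirely: row counts come from len(row)-row.count(None), the 15-number check becomes len(rows)==3 (valid since each row has exactly 5), and the column check is a column-major scan counting occupied column indices up to the maximal row width instead of building a set row-major.
import Mathlib
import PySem

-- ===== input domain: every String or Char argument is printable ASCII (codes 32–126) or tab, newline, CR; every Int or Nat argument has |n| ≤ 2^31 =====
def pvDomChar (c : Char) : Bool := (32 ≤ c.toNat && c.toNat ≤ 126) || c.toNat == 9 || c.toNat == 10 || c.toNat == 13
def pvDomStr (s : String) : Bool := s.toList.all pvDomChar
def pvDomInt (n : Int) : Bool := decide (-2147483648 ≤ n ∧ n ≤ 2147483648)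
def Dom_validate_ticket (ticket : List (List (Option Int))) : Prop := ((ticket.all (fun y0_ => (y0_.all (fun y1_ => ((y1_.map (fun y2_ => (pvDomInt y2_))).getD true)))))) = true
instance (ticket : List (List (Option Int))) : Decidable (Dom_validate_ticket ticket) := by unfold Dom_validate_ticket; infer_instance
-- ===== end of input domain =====

-- B drops A's running total and column set: row counts via len - count(None), the
-- 15-number check becomes len(rows) == 3, the column check is a column-major scan
-- counting occupied columns up to the maximal row width; objective: alternative.


-- ===== PORT A =====
-- count = sum(1 for n in row if n is not None)
def rowCount (row : List (Option Int)) : Int :=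
  row.foldl (fun acc n => if n.isSome then acc + 1 else acc) 0

-- for i, val in enumerate(row): if val is not None: all_cols.add(i)
def addRowCols (s : PySem.Set Int) (row : List (Option Int)) : PySem.Set Int :=
  (PySem.List.enumerate row).foldl
    (fun acc p => if p.2.isSome then PySem.Set.add acc p.1 else acc) s

-- A's loop with early return, carrying all_cols and total_numbers
def goA : List (List (Option Int)) → PySem.Set Int → Int → Bool × String
  | [], cols, total =>
    if total ≠ 15 then (false, "Ticket does not have 15 numbers")
    else if (cols.length : Int) ≠ 9 then (false, "Ticket does not use all 9 columns")
    else (true, "Valid")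
  | r :: rs, cols, total =>
    let count := rowCount r
    if count ≠ 5 then (false, "Row does not have exactly 5 numbers")
    else goA rs (addRowCols cols r) (total + count)

def validate_ticket (ticket : List (List (Option Int))) : Bool × String :=
  goA ticket PySem.Set.empty 0

-- ===== PORT B =====
-- len(row) - row.count(None)
def rowCountB (row : List (Option Int)) : Int :=
  (row.length : Int) - PySem.List.count row none

-- width = 0; for row in rows: width = max(width, len(row))
def widthOf (rows : List (List (Option Int))) : Nat :=
  rows.foldl (fun w r => max w r.length) 0

-- any(len(r) > i and r[i] is not None for r in rows)   (i ∈ range(width) is ≥ 0,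
-- and the len(r) > i guard makes r[i] the plain in-range element: exact as List.getD)
def colUsed (rows : List (List (Option Int))) (i : Nat) : Bool :=
  rows.any (fun r => decide (i < r.length) && (r.getD i none).isSome)

-- used = 0; for i in range(width): if any(...): used += 1
def usedCount (rows : List (List (Option Int))) : Int :=
  (List.range (widthOf rows)).foldl (fun u i => if colUsed rows i then u + 1 else u) 0

def validate_ticket_alt (ticket : List (List (Option Int))) : Bool × String :=
  if ticket.any (fun r => rowCountB r ≠ 5) then (false, "Row does not have exactly 5 numbers")
  else if (ticket.length : Int) ≠ 3 then (false, "Ticket does not have 15 numbers")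
  else if usedCount ticket ≠ 9 then (false, "Ticket does not use all 9 columns")
  else (true, "Valid")

-- ===== PRECONDITION & SPEC =====
def Spec_validate_ticket (ticket : List (List (Option Int))) (out : Bool × String) : Prop := out = validate_ticket_alt ticket
instance (ticket : List (List (Option Int))) (out : Bool × String) : Decidable (Spec_validate_ticket ticket out) := by unfold Spec_validate_ticket; infer_instance

-- ===== CLAIM (what is proved, stated in full; the proofs are below) =====
def Claim_equal_validate_ticket : Prop := ∀ (ticket : List (List (Option Int))), Dom_validate_ticket ticket → Spec_validate_ticket ticket (validate_ticket ticket)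

-- ===== LEMMAS AND PROOFS =====

-- A's loop, started from any accumulator state, in three-pass shape.
theorem goA_eq (rs : List (List (Option Int))) :
    ∀ (cols : PySem.Set Int) (total : Int),
    goA rs cols total =
      if rs.any (fun r => rowCount r ≠ 5) then (false, "Row does not have exactly 5 numbers")
      else if total + (rs.map rowCount).sum ≠ 15 then (false, "Ticket does not have 15 numbers")
      else if (((rs.foldl addRowCols cols).length : Int)) ≠ 9 then
        (false, "Ticket does not use all 9 columns")
      else (true, "Valid") := by
  induction rs with
  | nil =>
    intro cols total
    simp only [goA, List.any_nil, List.map_nil, List.sum_nil, List.foldl_nil,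
      Bool.false_eq_true, if_false, add_zero]
    split_ifs <;> rfl
  | cons r rs ih =>
    intro cols total
    by_cases h : rowCount r = 5
    · simp only [goA, h, ih, List.any_cons, List.map_cons, List.sum_cons, List.foldl_cons,
        add_assoc, ne_eq, not_true_eq_false, decide_false, Bool.false_or, if_false]
      split_ifs <;> rfl
    · simp [goA, h]

-- len(row) - row.count(None) counts the non-None entries.
theorem count_none_aux (row : List (Option Int)) :
    (row.length : Int) - List.count none row = (row.countP (fun n => n.isSome) : Int) := by
  induction row with
  | nil => simp
  | cons a t ih =>
    simp only [List.length_cons, List.count_cons, List.countP_cons]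
    cases a <;> simp <;> omega

theorem rowCountB_eq (row : List (Option Int)) : rowCountB row = rowCount row := by
  unfold rowCountB rowCount
  rw [PySem.List.foldl_if_add_one, PySem.List.count_eq, zero_add, count_none_aux]

-- if every row counts 5, the total is 5 * number of rows
theorem sum_rowCount (rs : List (List (Option Int))) (h : ∀ r ∈ rs, rowCount r = 5) :
    (rs.map rowCount).sum = 5 * rs.length := by
  induction rs with
  | nil => simp
  | cons r t ih =>
    have hr := h r (by simp)
    simp only [List.map_cons, List.sum_cons, List.length_cons, hr,
      ih (fun x hx => h x (List.mem_cons_of_mem _ hx))]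
    push_cast; ring

-- the conditional-add fold, membership
theorem mem_foldl_ite_add (l : List (Int × Option Int)) (s : PySem.Set Int) (y : Int) :
    (y ∈ l.foldl (fun acc p => if p.2.isSome then PySem.Set.add acc p.1 else acc) s) ↔
      y ∈ s ∨ ∃ p ∈ l, p.2.isSome ∧ y = p.1 := by
  induction l generalizing s with
  | nil => simp
  | cons p t ih =>
    simp only [List.foldl_cons, List.mem_cons]
    by_cases hp : p.2.isSome
    · rw [if_pos hp, ih]
      simp only [PySem.Set.mem_add]
      constructor
      · rintro ((h | h) | ⟨q, hq, h1, h2⟩)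
        · exact Or.inl h
        · exact Or.inr ⟨p, Or.inl rfl, hp, h⟩
        · exact Or.inr ⟨q, Or.inr hq, h1, h2⟩
      · rintro (h | ⟨q, (rfl | hq), h1, h2⟩)
        · exact Or.inl (Or.inl h)
        · exact Or.inl (Or.inr h2)
        · exact Or.inr ⟨q, hq, h1, h2⟩
    · rw [if_neg hp, ih]
      constructor
      · rintro (h | ⟨q, hq, h1, h2⟩)
        · exact Or.inl h
        · exact Or.inr ⟨q, Or.inr hq, h1, h2⟩
      · rintro (h | ⟨q, (rfl | hq), h1, h2⟩)
        · exact Or.inl h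
        · exact absurd h1 hp
        · exact Or.inr ⟨q, hq, h1, h2⟩

-- the conditional-add fold preserves Nodup
theorem nodup_foldl_ite_add (l : List (Int × Option Int)) (s : PySem.Set Int) (h : s.Nodup) :
    (l.foldl (fun acc p => if p.2.isSome then PySem.Set.add acc p.1 else acc) s).Nodup := by
  induction l generalizing s with
  | nil => simpa using h
  | cons p t ih =>
    simp only [List.foldl_cons]
    by_cases hp : p.2.isSome
    · rw [if_pos hp]; exact ih _ (PySem.Set.nodup_add _ _ h)
    · rw [if_neg hp]; exact ih _ h

theorem mem_addRowCols (s : PySem.Set Int) (r : List (Option Int)) (y : Int) :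
    y ∈ addRowCols s r ↔
      y ∈ s ∨ ∃ k : Nat, k < r.length ∧ (r.getD k none).isSome ∧ y = (k : Int) := by
  unfold addRowCols
  rw [mem_foldl_ite_add]
  apply or_congr Iff.rfl
  constructor
  · rintro ⟨p, hp, hsome, rfl⟩
    rw [PySem.List.mem_enumerate_iff] at hp
    obtain ⟨k, hk, rfl⟩ := hp
    refine ⟨k, hk, ?_, by simp⟩
    rw [List.getD_eq_getElem _ _ hk]
    simpa using hsome
  · rintro ⟨k, hk, hsome, rfl⟩
    refine ⟨((k : Int), r[k]), ?_, ?_, rfl⟩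
    · rw [PySem.List.mem_enumerate_iff]; exact ⟨k, hk, by simp⟩
    · rw [List.getD_eq_getElem _ _ hk] at hsome
      simpa using hsome

theorem nodup_addRowCols (s : PySem.Set Int) (r : List (Option Int)) (h : s.Nodup) :
    (addRowCols s r).Nodup := nodup_foldl_ite_add _ _ h

theorem mem_foldl_addRowCols (ts : List (List (Option Int))) (s : PySem.Set Int) (y : Int) :
    (y ∈ ts.foldl addRowCols s) ↔
      y ∈ s ∨ ∃ r ∈ ts, ∃ k : Nat, k < r.length ∧ (r.getD k none).isSome ∧ y = (k : Int) := by
  induction ts generalizing s with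
  | nil => simp
  | cons r t ih =>
    simp only [List.foldl_cons, List.mem_cons, ih, mem_addRowCols]
    constructor
    · rintro (h | h)
      · rcases h with h | ⟨k, hk⟩
        · exact Or.inl h
        · exact Or.inr ⟨r, Or.inl rfl, k, hk⟩
      · obtain ⟨q, hq, hk⟩ := h
        exact Or.inr ⟨q, Or.inr hq, hk⟩
    · rintro (h | ⟨q, hq, hk⟩)
      · exact Or.inl (Or.inl h)
      · rcases hq with rfl | hq
        · exact Or.inl (Or.inr hk)
        · exact Or.inr ⟨q, hq, hk⟩

theorem nodup_foldl_addRowCols (ts : List (List (Option Int))) (s : PySem.Set Int) (h : s.Nodup) :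
    (ts.foldl addRowCols s).Nodup := by
  induction ts generalizing s with
  | nil => exact h
  | cons r t ih => exact ih _ (nodup_addRowCols _ _ h)

theorem le_foldl_max (ts : List (List (Option Int))) (b : Nat) :
    b ≤ ts.foldl (fun w r => max w r.length) b := by
  induction ts generalizing b with
  | nil => exact le_refl _
  | cons r t ih => exact le_trans (le_max_left _ _) (ih (max b r.length))

theorem length_le_foldl_max (ts : List (List (Option Int))) (r : List (Option Int))
    (h : r ∈ ts) : ∀ b, r.length ≤ ts.foldl (fun w r => max w r.length) b := by
  induction ts with
  | nil => cases h
  | cons q t ih =>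
    intro b
    rcases List.mem_cons.1 h with rfl | h
    · exact le_trans (le_max_right _ _) (le_foldl_max t _)
    · exact ih h _

-- A's column set has exactly as many elements as B's column-major scan counts.
theorem cols_length_eq (ts : List (List (Option Int))) :
    (((ts.foldl addRowCols PySem.Set.empty).length : Int)) = usedCount ts := by
  unfold usedCount
  rw [PySem.List.foldl_if_add_one, zero_add]
  have hperm : (ts.foldl addRowCols PySem.Set.empty).Perm
      (((List.range (widthOf ts)).filter (colUsed ts)).map (fun j : Nat => (j : Int))) := by
    apply (List.perm_ext_iff_of_nodup
      (nodup_foldl_addRowCols ts _ List.nodup_nil)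
      (((List.nodup_range).filter _).map (fun a b => by exact_mod_cast id))).2
    intro y
    rw [mem_foldl_addRowCols]
    simp only [List.mem_map, List.mem_filter, List.mem_range, List.not_mem_nil, false_or]
    constructor
    · rintro ⟨r, hr, k, hk, hsome, rfl⟩
      refine ⟨k, ⟨lt_of_lt_of_le hk (length_le_foldl_max ts r hr 0), ?_⟩, rfl⟩
      unfold colUsed
      rw [List.any_eq_true]
      refine ⟨r, hr, ?_⟩
      rw [List.getD_eq_getElem _ _ hk] at hsome
      simp [hk, hsome]
    · rintro ⟨k, ⟨_, hused⟩, rfl⟩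
      unfold colUsed at hused
      rw [List.any_eq_true] at hused
      obtain ⟨r, hr, hcond⟩ := hused
      simp only [Bool.and_eq_true, decide_eq_true_eq] at hcond
      exact ⟨r, hr, k, hcond.1, hcond.2, rfl⟩
  rw [hperm.length_eq, List.length_map, List.countP_eq_length_filter]

-- ===== VERDICT (by name: the statement is the Claim_ definition above) =====
theorem validate_ticket_spec : Claim_equal_validate_ticket := by
  intro ticket _
  unfold Spec_validate_ticket validate_ticket validate_ticket_alt
  rw [goA_eq]
  simp only [rowCountB_eq, zero_add, cols_length_eq]
  by_cases hbad : ∃ r ∈ ticket, ¬rowCount r = 5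
  · simp [hbad]
  · have hall : ∀ r ∈ ticket, rowCount r = 5 := by
      intro r hr; by_contra hne; exact hbad ⟨r, hr, hne⟩
    have h15 : ((List.map rowCount ticket).sum = 15) = (((ticket.length : Int)) = 3) := by
      rw [sum_rowCount ticket hall]; apply propext; omega
    simp [hbad, h15]
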